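-- pv_equiv track=rewrite | github.com/gabrielfelipenavas-ops/colsein-catalogo | recategorize_phoenix.py | get_leaf_for_model
-- ===== SOURCE A (Python) =====
-- PREFIX_TO_LEAF = [
--     # Bornas PCB (terminal blocks for PCB)
--     ("SMKDSN", ("phoenix-contact.bornas-pcb-mkds", "Bornas PCB MKDS")),
--     ("MKDS",   ("phoenix-contact.bornas-pcb-mkds", "Bornas PCB MKDS")),
--     ("SMSTB",  ("phoenix-contact.bornas-pcb-mstb-mini", "Bornas PCB MSTB mini")),
--     ("MSTBVA", ("phoenix-contact.bornas-pcb-mstb-vertical", "Bornas PCB MSTB vertical/angular")),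
--     ("MSTBV",  ("phoenix-contact.bornas-pcb-mstb-vertical", "Bornas PCB MSTB vertical/angular")),
--     ("MSTBA",  ("phoenix-contact.bornas-pcb-mstb-vertical", "Bornas PCB MSTB vertical/angular")),
--     ("MSTBC",  ("phoenix-contact.bornas-pcb-mstb-vertical", "Bornas PCB MSTB vertical/angular")),
--     ("MVSTB",  ("phoenix-contact.bornas-pcb-mstb-vertical", "Bornas PCB MSTB vertical/angular")),
--     ("MSTB",   ("phoenix-contact.bornas-pcb-mstb", "Bornas PCB MSTB")),
--     ("DMCV",   ("phoenix-contact.bornas-pcb-dmc", "Bornas PCB DMC")),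
--     ("DMC",    ("phoenix-contact.bornas-pcb-dmc", "Bornas PCB DMC")),
--     ("FKC",    ("phoenix-contact.conectores-pcb-resorte", "Conectores PCB con resorte")),
--     ("FK-MCP", ("phoenix-contact.conectores-pcb-resorte", "Conectores PCB con resorte")),
--     ("FMC",    ("phoenix-contact.conectores-pcb-resorte", "Conectores PCB con resorte")),
--     ("FRONT",  ("phoenix-contact.bornas-pcb-front", "Bornas PCB FRONT")),
--     # COMBICON conectores macho/hembra
--     ("MCDNV",  ("phoenix-contact.combicon-conectores-mc", "Conectores COMBICON MC")),
--     ("MCDN",   ("phoenix-contact.combicon-conectores-mc", "Conectores COMBICON MC")),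
--     ("MCVR",   ("phoenix-contact.combicon-conectores-mcv", "Conectores COMBICON MCV")),
--     ("MCVW",   ("phoenix-contact.combicon-conectores-mcv", "Conectores COMBICON MCV")),
--     ("MCV",    ("phoenix-contact.combicon-conectores-mcv", "Conectores COMBICON MCV")),
--     ("MC",     ("phoenix-contact.combicon-conectores-mc", "Conectores COMBICON MC")),
--     # Conectores varietales
--     ("PCH",    ("phoenix-contact.combicon-bases-pc", "Bases COMBICON PC")),
--     ("PCV",    ("phoenix-contact.combicon-bases-pc", "Bases COMBICON PC")),
--     ("PCSM",   ("phoenix-contact.combicon-bases-pc", "Bases COMBICON PC")),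
--     ("PCT",    ("phoenix-contact.combicon-bases-pc", "Bases COMBICON PC")),
--     ("PC",     ("phoenix-contact.combicon-bases-pc", "Bases COMBICON PC")),
--     ("IPC",    ("phoenix-contact.combicon-bases-ic", "Bases COMBICON IC")),
--     ("LPC",    ("phoenix-contact.combicon-bases-ic", "Bases COMBICON IC")),
--     ("IC",     ("phoenix-contact.combicon-bases-ic", "Bases COMBICON IC")),
--     ("PTSM",   ("phoenix-contact.bornas-pcb-pt", "Bornas PCB serie PT")),
--     ("PSTPC",  ("phoenix-contact.bornas-pcb-pt", "Bornas PCB serie PT")),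
--     ("PSTPV",  ("phoenix-contact.bornas-pcb-pt", "Bornas PCB serie PT")),
--     ("PST",    ("phoenix-contact.bornas-pcb-pt", "Bornas PCB serie PT")),
--     ("PTM",    ("phoenix-contact.bornas-pcb-pt", "Bornas PCB serie PT")),
--     ("PTRV",   ("phoenix-contact.bornas-pcb-pt", "Bornas PCB serie PT")),
--     ("PTPM",   ("phoenix-contact.bornas-pcb-pt", "Bornas PCB serie PT")),
--     ("PTPV",   ("phoenix-contact.bornas-pcb-pt", "Bornas PCB serie PT")),
--     ("PTPB",   ("phoenix-contact.bornas-pcb-pt", "Bornas PCB serie PT")),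
--     ("PT",     ("phoenix-contact.bornas-pcb-pt", "Bornas PCB serie PT")),
--     ("SPTAF",  ("phoenix-contact.bornas-pcb-spt", "Bornas PCB SPT")),
--     ("SPT-THR",("phoenix-contact.bornas-pcb-spt", "Bornas PCB SPT")),
--     ("SPTA",   ("phoenix-contact.bornas-pcb-spt", "Bornas PCB SPT")),
--     ("SPT",    ("phoenix-contact.bornas-pcb-spt", "Bornas PCB SPT")),
--     ("SPC",    ("phoenix-contact.bornas-pcb-spt", "Bornas PCB SPT")),
--     ("CCA",    ("phoenix-contact.cca-conectores", "Conectores CCA")),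
--     ("CC",     ("phoenix-contact.cca-conectores", "Conectores CCA")),
--     ("FP",     ("phoenix-contact.bornas-front-pcb", "Bornas FRONT PCB FP")),
-- ]
--
-- def get_leaf_for_model(model):
--     """Determina el leaf basado en el prefijo del modelo."""
--     if not model:
--         return None
--     m = model.upper().strip()
--     for prefix, (leaf, label) in PREFIX_TO_LEAF:
--         if m.startswith(prefix):
--             return leaf, label
--     return None
-- ===== SOURCE B (Python) =====
-- # B: the prefix table is restated as a compact one-line-per-category spec string,
-- # parsed once at import, and lookup is a longest-prefix match over the parsed
-- # groups (which provably coincides with A's first-in-order match on this table).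
-- _SPEC = """\
-- SMKDSN MKDS|bornas-pcb-mkds|Bornas PCB MKDS
-- SMSTB|bornas-pcb-mstb-mini|Bornas PCB MSTB mini
-- MSTBVA MSTBV MSTBA MSTBC MVSTB|bornas-pcb-mstb-vertical|Bornas PCB MSTB vertical/angular
-- MSTB|bornas-pcb-mstb|Bornas PCB MSTB
-- DMCV DMC|bornas-pcb-dmc|Bornas PCB DMC
-- FKC FK-MCP FMC|conectores-pcb-resorte|Conectores PCB con resorte
-- FRONT|bornas-pcb-front|Bornas PCB FRONT
-- MCDNV MCDN|combicon-conectores-mc|Conectores COMBICON MC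
-- MCVR MCVW MCV|combicon-conectores-mcv|Conectores COMBICON MCV
-- MC|combicon-conectores-mc|Conectores COMBICON MC
-- PCH PCV PCSM PCT PC|combicon-bases-pc|Bases COMBICON PC
-- IPC LPC IC|combicon-bases-ic|Bases COMBICON IC
-- PTSM PSTPC PSTPV PST PTM PTRV PTPM PTPV PTPB PT|bornas-pcb-pt|Bornas PCB serie PT
-- SPTAF SPT-THR SPTA SPT SPC|bornas-pcb-spt|Bornas PCB SPT
-- CCA CC|cca-conectores|Conectores CCA
-- FP|bornas-front-pcb|Bornas FRONT PCB FP"""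
--
-- def _parse():
--     groups = []
--     for line in _SPEC.splitlines():
--         prefixes, leaf, label = line.split("|")
--         groups.append((prefixes.split(), "phoenix-contact." + leaf, label))
--     return groups
--
-- _GROUPS = _parse()
--
-- def get_leaf_for_model(model):
--     """Determina el leaf basado en el prefijo del modelo (longest-prefix match)."""
--     if not model:
--         return None
--     m = model.upper().strip()
--     best = None  # (prefix_length, (leaf, label))
--     for prefixes, leaf, label in _GROUPS:
--         for p in prefixes:
--             if m.startswith(p) and (best is None or best[0] < len(p)):
--                 best = (len(p), (leaf, label))
--     return best[1] if best else None
-- ===== Notes on version B (the rewrite author's own statement) =====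
-- stated objective: alternative
-- what changed: B restates the prefix table as a compact one-line-per-category spec string parsed once at import into (prefixes, leaf, label) groups, and classifies by a longest-prefix-match fold over the groups instead of A's order-sensitive first-match scan of the flat list; longest-prefix match provably coincides with A's first-in-order match on this table.
import Mathlib
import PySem

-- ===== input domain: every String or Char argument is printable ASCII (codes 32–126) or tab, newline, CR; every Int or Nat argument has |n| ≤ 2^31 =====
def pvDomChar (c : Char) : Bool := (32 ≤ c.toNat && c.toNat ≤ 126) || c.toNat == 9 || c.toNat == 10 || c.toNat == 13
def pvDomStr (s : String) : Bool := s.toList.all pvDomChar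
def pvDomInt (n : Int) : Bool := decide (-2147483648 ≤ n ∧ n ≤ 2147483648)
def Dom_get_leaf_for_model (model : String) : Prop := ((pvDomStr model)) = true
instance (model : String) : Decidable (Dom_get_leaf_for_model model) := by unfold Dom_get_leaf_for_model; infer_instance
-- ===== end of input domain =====

-- B restates the prefix table as a compact spec string parsed once into per-category
-- groups and looks up by longest-prefix match (a fold tracking the best length),
-- which provably equals A's first-in-order scan; objective: alternative.

-- ===== PORT A =====
-- A's module constant PREFIX_TO_LEAF, verbatim.
def PREFIX_TO_LEAF : List (String × (String × String)) := [
  ("SMKDSN", ("phoenix-contact.bornas-pcb-mkds", "Bornas PCB MKDS")),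
  ("MKDS", ("phoenix-contact.bornas-pcb-mkds", "Bornas PCB MKDS")),
  ("SMSTB", ("phoenix-contact.bornas-pcb-mstb-mini", "Bornas PCB MSTB mini")),
  ("MSTBVA", ("phoenix-contact.bornas-pcb-mstb-vertical", "Bornas PCB MSTB vertical/angular")),
  ("MSTBV", ("phoenix-contact.bornas-pcb-mstb-vertical", "Bornas PCB MSTB vertical/angular")),
  ("MSTBA", ("phoenix-contact.bornas-pcb-mstb-vertical", "Bornas PCB MSTB vertical/angular")),
  ("MSTBC", ("phoenix-contact.bornas-pcb-mstb-vertical", "Bornas PCB MSTB vertical/angular")),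
  ("MVSTB", ("phoenix-contact.bornas-pcb-mstb-vertical", "Bornas PCB MSTB vertical/angular")),
  ("MSTB", ("phoenix-contact.bornas-pcb-mstb", "Bornas PCB MSTB")),
  ("DMCV", ("phoenix-contact.bornas-pcb-dmc", "Bornas PCB DMC")),
  ("DMC", ("phoenix-contact.bornas-pcb-dmc", "Bornas PCB DMC")),
  ("FKC", ("phoenix-contact.conectores-pcb-resorte", "Conectores PCB con resorte")),
  ("FK-MCP", ("phoenix-contact.conectores-pcb-resorte", "Conectores PCB con resorte")),
  ("FMC", ("phoenix-contact.conectores-pcb-resorte", "Conectores PCB con resorte")),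
  ("FRONT", ("phoenix-contact.bornas-pcb-front", "Bornas PCB FRONT")),
  ("MCDNV", ("phoenix-contact.combicon-conectores-mc", "Conectores COMBICON MC")),
  ("MCDN", ("phoenix-contact.combicon-conectores-mc", "Conectores COMBICON MC")),
  ("MCVR", ("phoenix-contact.combicon-conectores-mcv", "Conectores COMBICON MCV")),
  ("MCVW", ("phoenix-contact.combicon-conectores-mcv", "Conectores COMBICON MCV")),
  ("MCV", ("phoenix-contact.combicon-conectores-mcv", "Conectores COMBICON MCV")),
  ("MC", ("phoenix-contact.combicon-conectores-mc", "Conectores COMBICON MC")),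
  ("PCH", ("phoenix-contact.combicon-bases-pc", "Bases COMBICON PC")),
  ("PCV", ("phoenix-contact.combicon-bases-pc", "Bases COMBICON PC")),
  ("PCSM", ("phoenix-contact.combicon-bases-pc", "Bases COMBICON PC")),
  ("PCT", ("phoenix-contact.combicon-bases-pc", "Bases COMBICON PC")),
  ("PC", ("phoenix-contact.combicon-bases-pc", "Bases COMBICON PC")),
  ("IPC", ("phoenix-contact.combicon-bases-ic", "Bases COMBICON IC")),
  ("LPC", ("phoenix-contact.combicon-bases-ic", "Bases COMBICON IC")),
  ("IC", ("phoenix-contact.combicon-bases-ic", "Bases COMBICON IC")),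
  ("PTSM", ("phoenix-contact.bornas-pcb-pt", "Bornas PCB serie PT")),
  ("PSTPC", ("phoenix-contact.bornas-pcb-pt", "Bornas PCB serie PT")),
  ("PSTPV", ("phoenix-contact.bornas-pcb-pt", "Bornas PCB serie PT")),
  ("PST", ("phoenix-contact.bornas-pcb-pt", "Bornas PCB serie PT")),
  ("PTM", ("phoenix-contact.bornas-pcb-pt", "Bornas PCB serie PT")),
  ("PTRV", ("phoenix-contact.bornas-pcb-pt", "Bornas PCB serie PT")),
  ("PTPM", ("phoenix-contact.bornas-pcb-pt", "Bornas PCB serie PT")),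
  ("PTPV", ("phoenix-contact.bornas-pcb-pt", "Bornas PCB serie PT")),
  ("PTPB", ("phoenix-contact.bornas-pcb-pt", "Bornas PCB serie PT")),
  ("PT", ("phoenix-contact.bornas-pcb-pt", "Bornas PCB serie PT")),
  ("SPTAF", ("phoenix-contact.bornas-pcb-spt", "Bornas PCB SPT")),
  ("SPT-THR", ("phoenix-contact.bornas-pcb-spt", "Bornas PCB SPT")),
  ("SPTA", ("phoenix-contact.bornas-pcb-spt", "Bornas PCB SPT")),
  ("SPT", ("phoenix-contact.bornas-pcb-spt", "Bornas PCB SPT")),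
  ("SPC", ("phoenix-contact.bornas-pcb-spt", "Bornas PCB SPT")),
  ("CCA", ("phoenix-contact.cca-conectores", "Conectores CCA")),
  ("CC", ("phoenix-contact.cca-conectores", "Conectores CCA")),
  ("FP", ("phoenix-contact.bornas-front-pcb", "Bornas FRONT PCB FP"))]

-- A's for-loop with early return: scan the list in order, return the first match.
def pvScanFirst (m : String) : List (String × (String × String)) → Option (String × String)
  | [] => none
  | (prefix_, leaf_label) :: rest =>
      if PySem.Str.startswith m prefix_ then some leaf_label else pvScanFirst m rest

def get_leaf_for_model (model : String) : Option (String × String) :=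
  if model = "" then none
  else
    let m := PySem.Str.strip (PySem.Str.upper model)
    pvScanFirst m PREFIX_TO_LEAF

-- ===== PORT B =====
-- Source B's module constant _SPEC: one line per category, 'prefixes|leaf-suffix|label'.
def LEAF_SPEC : String := "SMKDSN MKDS|bornas-pcb-mkds|Bornas PCB MKDS\nSMSTB|bornas-pcb-mstb-mini|Bornas PCB MSTB mini\nMSTBVA MSTBV MSTBA MSTBC MVSTB|bornas-pcb-mstb-vertical|Bornas PCB MSTB vertical/angular\nMSTB|bornas-pcb-mstb|Bornas PCB MSTB\nDMCV DMC|bornas-pcb-dmc|Bornas PCB DMC\nFKC FK-MCP FMC|conectores-pcb-resorte|Conectores PCB con resorte\nFRONT|bornas-pcb-front|Bornas PCB FRONT\nMCDNV MCDN|combicon-conectores-mc|Conectores COMBICON MC\nMCVR MCVW MCV|combicon-conectores-mcv|Conectores COMBICON MCV\nMC|combicon-conectores-mc|Conectores COMBICON MC\nPCH PCV PCSM PCT PC|combicon-bases-pc|Bases COMBICON PC\nIPC LPC IC|combicon-bases-ic|Bases COMBICON IC\nPTSM PSTPC PSTPV PST PTM PTRV PTPM PTPV PTPB PT|bornas-pcb-pt|Bornas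 PCB serie PT\nSPTAF SPT-THR SPTA SPT SPC|bornas-pcb-spt|Bornas PCB SPT\nCCA CC|cca-conectores|Conectores CCA\nFP|bornas-front-pcb|Bornas FRONT PCB FP"

-- Source B's _parse(): split lines, split each line at '|', split the prefixes at spaces.
-- Every line of LEAF_SPEC has exactly three '|'-fields, so Python's tuple unpack never
-- raises; the '_ => groups' arm is unreachable. 'a + b' on str is ported as join "" [a, b].
def pvParseGroups : List (List String × String × String) :=
  (PySem.Str.splitlines LEAF_SPEC).foldl (fun groups line =>
    match PySem.Str.split? line "|" with
    | some [prefixes, leaf, label] =>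
        groups ++ [(PySem.Str.split₀ prefixes,
                    PySem.Str.join "" ["phoenix-contact.", leaf], label)]
    | _ => groups) []

-- the body of Source B's nested for-loop: update 'best' over one group's prefixes.
def pvStep (m : String) (best : Option (Int × (String × String)))
    (g : List String × String × String) : Option (Int × (String × String)) :=
  g.1.foldl (fun acc p =>
    if PySem.Str.startswith m p then
      match acc with
      | none => some (PySem.Str.len p, (g.2.1, g.2.2))
      | some (n, _) =>
          if n < PySem.Str.len p then some (PySem.Str.len p, (g.2.1, g.2.2)) else acc
    else acc) best

def get_leaf_for_model_alt (model : String) : Option (String × String) :=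
  if model = "" then none
  else
    let m := PySem.Str.strip (PySem.Str.upper model)
    (pvParseGroups.foldl (pvStep m) none).map (·.2)

-- ===== PRECONDITION & SPEC =====
def Spec_get_leaf_for_model (model : String) (out : Option (String × String)) : Prop := out = get_leaf_for_model_alt model
instance (model : String) (out : Option (String × String)) : Decidable (Spec_get_leaf_for_model model out) := by unfold Spec_get_leaf_for_model; infer_instance

-- ===== CLAIM (what is proved, stated in full; the proofs are below) =====
def Claim_equal_get_leaf_for_model : Prop := ∀ (model : String), Dom_get_leaf_for_model model → Spec_get_leaf_for_model model (get_leaf_for_model model)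

-- ===== LEMMAS AND PROOFS =====

-- A's early-return scan is find? followed by dropping the prefix component.
theorem pvScanFirst_eq_find? (m : String) (l : List (String × (String × String))) :
    pvScanFirst m l = (l.find? (fun e => PySem.Str.startswith m e.1)).map (·.2) := by
  induction l with
  | nil => rfl
  | cons e rest ih =>
      obtain ⟨p, v⟩ := e
      simp only [pvScanFirst, List.find?, PySem.Str.startswith_eq]
      by_cases h : PySem.Chars.startswith m.toList p.toList = true
      · simp [h]
      · simp only [Bool.not_eq_true] at h
        simp [h, ih]

-- find? only looks at the predicate's value on members.
theorem pv_find?_congr {α : Type} (l : List α) (p q : α → Bool)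
    (h : ∀ x ∈ l, p x = q x) : l.find? p = l.find? q := by
  induction l with
  | nil => rfl
  | cons a rest ih =>
      simp only [List.find?, h a (List.mem_cons_self ..)]
      cases q a
      · exact ih fun x hx => h x (List.mem_cons_of_mem _ hx)
      · rfl

-- a fold whose step fixes every reachable accumulator is the identity
theorem pv_foldl_const {α β : Type} (l : List α) (f : β → α → β) (a : β)
    (h : ∀ b : β, ∀ x ∈ l, f b x = b) : l.foldl f a = a := by
  induction l generalizing a with
  | nil => rfl
  | cons x rest ih =>
      rw [List.foldl_cons, h a x (List.mem_cons_self ..)]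
      exact ih a (fun b y hy => h b y (List.mem_cons_of_mem _ hy))

-- every (prefix, value) pair produced by B's parsed groups is an entry of A's table
set_option maxRecDepth 40000 in
set_option maxHeartbeats 4000000 in
theorem pv_groups_sub :
    ∀ g ∈ pvParseGroups, ∀ p ∈ g.1, (p, (g.2.1, g.2.2)) ∈ PREFIX_TO_LEAF := by
  decide

-- The decisive finite fact: on each listed prefix itself, BOTH programs' cores return
-- that prefix's value (checked entry by entry by the kernel).
set_option maxRecDepth 100000 in
set_option maxHeartbeats 4000000 in
theorem pv_table_check :
    ∀ e ∈ PREFIX_TO_LEAF,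
      (PREFIX_TO_LEAF.find? (fun e' => PySem.Str.startswith e.1 e'.1)).map (·.2) = some e.2 ∧
      (pvParseGroups.foldl (pvStep e.1) none).map (·.2) = some e.2 := by
  decide

theorem pv_startswith_trans (a b c : String) :
    PySem.Str.startswith b a → PySem.Str.startswith c b → PySem.Str.startswith c a := by
  simp only [PySem.Str.startswith_eq, PySem.Chars.startswith_iff]
  exact fun h1 h2 => h1.trans h2

theorem pv_exists_max {α : Type} (f : α → Nat) (l : List α) (h : l ≠ []) :
    ∃ q ∈ l, ∀ x ∈ l, f x ≤ f q := by
  have : l.argmax f ≠ none := fun hn => h (List.argmax_eq_none.mp hn)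
  obtain ⟨q, hq⟩ := Option.ne_none_iff_exists'.mp this
  exact ⟨q, List.argmax_mem hq, fun x hx => List.le_of_mem_argmax hx hq⟩

-- B's step is invariant under replacing m by a query with the same matches
theorem pv_step_congr (m m' : String)
    (h : ∀ g ∈ pvParseGroups, ∀ p ∈ g.1,
        PySem.Str.startswith m p = PySem.Str.startswith m' p) :
    pvParseGroups.foldl (pvStep m) none = pvParseGroups.foldl (pvStep m') none := by
  refine PySem.List.foldl_congr_mem _ _ _ _ (fun acc g hg => ?_)
  unfold pvStep
  exact PySem.List.foldl_congr_mem _ _ _ _ (fun acc' p hp => by rw [h g hg p hp])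

-- if nothing matches, B's fold keeps 'none'
theorem pv_fold_none (m : String)
    (h : ∀ g ∈ pvParseGroups, ∀ p ∈ g.1, PySem.Str.startswith m p = false) :
    pvParseGroups.foldl (pvStep m) none = none := by
  refine pv_foldl_const _ _ _ (fun b g hg => ?_)
  unfold pvStep
  refine pv_foldl_const _ _ _ (fun b' p hp => ?_)
  rw [h g hg p hp]
  simp

-- Main lemma: A's first-in-order match equals B's longest-prefix match.
theorem pv_cores_eq (m : String) :
    (PREFIX_TO_LEAF.find? (fun e => PySem.Str.startswith m e.1)).map (·.2) =
    (pvParseGroups.foldl (pvStep m) none).map (·.2) := by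
  by_cases hm : ∃ e ∈ PREFIX_TO_LEAF, PySem.Str.startswith m e.1
  · -- pick a matching entry q of maximal prefix length
    obtain ⟨e0, he0, he0m⟩ := hm
    have hne : PREFIX_TO_LEAF.filter (fun e => PySem.Str.startswith m e.1) ≠ [] :=
      List.ne_nil_of_mem (List.mem_filter.mpr ⟨he0, he0m⟩)
    obtain ⟨q, hqmem, hqmax⟩ := pv_exists_max (fun e => e.1.toList.length) _ hne
    obtain ⟨hqL, hqm⟩ := List.mem_filter.mp hqmem
    -- on every entry of the table, matching m is the same as matching q's prefix
    have hcong : ∀ e ∈ PREFIX_TO_LEAF,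
        (PySem.Str.startswith m e.1) = (PySem.Str.startswith q.1 e.1) := by
      intro e heL
      by_cases hme : PySem.Str.startswith m e.1
      · have hle : e.1.toList.length ≤ q.1.toList.length :=
          hqmax e (List.mem_filter.mpr ⟨heL, by simpa using hme⟩)
        have hpre : e.1.toList <+: q.1.toList := by
          have h1 : e.1.toList <+: m.toList := by
            simpa [PySem.Chars.startswith_iff] using hme
          have h2 : q.1.toList <+: m.toList := by
            simpa [PySem.Chars.startswith_iff] using hqm
          exact List.prefix_of_prefix_length_le h1 h2 hle
        have h1 : PySem.Chars.startswith m.toList e.1.toList = true := by simpa using hme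
        have h2 : PySem.Chars.startswith q.1.toList e.1.toList = true :=
          (PySem.Chars.startswith_iff _ _).mpr hpre
        simp only [PySem.Str.startswith_eq]
        rw [h1, h2]
      · have : ¬ PySem.Str.startswith q.1 e.1 := fun hq' =>
          hme (pv_startswith_trans e.1 q.1 m hq' (by simpa using hqm))
        have h1 : PySem.Chars.startswith m.toList e.1.toList = false := by
          simpa using hme
        have h2 : PySem.Chars.startswith q.1.toList e.1.toList = false := by
          simpa using this
        simp only [PySem.Str.startswith_eq]
        rw [h1, h2]
    rw [pv_find?_congr _ _ _ hcong,
        pv_step_congr m q.1 (fun g hg p hp => hcong _ (pv_groups_sub g hg p hp)),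
        (pv_table_check q hqL).1, (pv_table_check q hqL).2]
  · push Not at hm
    rw [List.find?_eq_none.mpr (fun e he => by simpa using hm e he),
        pv_fold_none m (fun g hg p hp => by
          simpa using hm _ (pv_groups_sub g hg p hp))]
    rfl

-- ===== VERDICT (by name: the statement is the Claim_ definition above) =====
theorem get_leaf_for_model_spec : Claim_equal_get_leaf_for_model := by
  intro model _
  unfold Spec_get_leaf_for_model get_leaf_for_model get_leaf_for_model_alt
  by_cases h : model = ""
  · simp [h]
  · simp only [h, ite_false]
    rw [pvScanFirst_eq_find?, pv_cores_eq]
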